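-- pv_equiv track=rewrite | github.com/mlockwood/bioinformatics | genome_sequencing/antibiotics.py | find_spectral_convolution
-- ===== SOURCE A (Python) =====
-- def spectrum_str_to_list(spectrum):
--     """
--     Take a spectrum string and convert it to a list of integers.
--     :param spectrum: space delimited spectrum string
--     :return: spectrum as a list of integers
--     """
--     return sorted([int(s) for s in spectrum.split()] if isinstance(spectrum, str) else spectrum)
--
-- def find_spectral_convolution(spectrum, zeros=False):
--     """
--     Find the convolution of masses for a spectrum.
--     :param spectrum: experimental mass spectrum
--     :param zeros: determination about whether to allow zeros
--     :return: {convolution_mass: count}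
--     """
--     # Handle string input
--     spectrum = sorted(spectrum_str_to_list(spectrum), reverse=True)
--
--     # Build convolution
--     convolution = {}
--     i = 0
--     while i < len(spectrum):
--         j = i + 1
--         while j < len(spectrum):
--             # Skip zeros if zeros is False
--             if spectrum[i] != spectrum[j] or zeros:
--                 convolution[spectrum[i]-spectrum[j]] = convolution.get(spectrum[i]-spectrum[j], 0) + 1
--             j += 1
--         i += 1
--
--     return convolution
-- ===== SOURCE B (Python) =====
-- def find_spectral_convolution(spectrum, zeros=False):
--     """Group equal masses first, then convolve distinct masses weighted by
--     multiplicities: O(n log n + k^2) over k distinct masses instead of O(n^2) pairs."""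
--     # multiplicity table over masses, in descending mass order
--     counts = {}
--     for m in sorted(spectrum, reverse=True):
--         counts[m] = counts.get(m, 0) + 1
--     groups = list(counts.items())
--     convolution = {}
--     while groups:
--         v, c = groups.pop(0)
--         if zeros and c > 1:
--             convolution[0] = convolution.get(0, 0) + c * (c - 1) // 2
--         for w, cw in groups:
--             convolution[v - w] = convolution.get(v - w, 0) + c * cw
--     return convolution
-- ===== Notes on version B (the rewrite author's own statement) =====
-- stated objective: faster
-- what changed: B builds a multiplicity table of the sorted masses first and convolves only the distinct masses weighted by their multiplicities (plus a closed-form c*(c-1)/2 term for the zero differences), replacing A's double loop over all element pairs.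
import Mathlib
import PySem

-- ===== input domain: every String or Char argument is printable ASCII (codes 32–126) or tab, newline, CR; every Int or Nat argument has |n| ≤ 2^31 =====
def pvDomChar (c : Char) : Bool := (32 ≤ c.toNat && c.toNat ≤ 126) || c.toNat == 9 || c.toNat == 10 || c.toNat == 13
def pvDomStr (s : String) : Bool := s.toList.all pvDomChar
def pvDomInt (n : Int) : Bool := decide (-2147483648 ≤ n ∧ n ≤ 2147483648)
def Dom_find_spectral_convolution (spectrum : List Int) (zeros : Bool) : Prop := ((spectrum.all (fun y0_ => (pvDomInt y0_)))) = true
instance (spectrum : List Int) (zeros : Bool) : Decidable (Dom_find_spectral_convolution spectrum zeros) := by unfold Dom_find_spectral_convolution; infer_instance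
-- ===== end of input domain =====

-- B groups equal masses first (a multiplicity table over the sorted spectrum) and convolves the
-- distinct masses weighted by multiplicities, instead of A's pairwise double loop over all elements.

-- ===== PORT A =====
-- inner 'while j < len(spectrum)' loop; xi = spectrum[i]
def aInner (s : List Int) (zeros : Bool) (xi : Int) (j : Nat) (conv : PySem.Dict Int Int) :
    PySem.Dict Int Int :=
  if h : j < s.length then
    let xj := s[j]
    aInner s zeros xi (j + 1)
      (if (xi != xj) || zeros then conv.insert (xi - xj) (conv.getD (xi - xj) 0 + 1) else conv)
  else conv
termination_by s.length - j

-- outer 'while i < len(spectrum)' loop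
def aOuter (s : List Int) (zeros : Bool) (i : Nat) (conv : PySem.Dict Int Int) :
    PySem.Dict Int Int :=
  if h : i < s.length then
    aOuter s zeros (i + 1) (aInner s zeros s[i] (i + 1) conv)
  else conv
termination_by s.length - i

def find_spectral_convolution (spectrum : List Int) (zeros : Bool) : List (Int × Int) :=
  -- spectrum = sorted(spectrum_str_to_list(spectrum), reverse=True); list input: sorted(sorted(spectrum), reverse=True)
  let s := PySem.List.sorted (PySem.List.sorted spectrum (fun x => x) false) (fun x => x) true
  (aOuter s zeros 0 PySem.Dict.empty).items

-- ===== PORT B =====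
-- 'while groups: v, c = groups.pop(0); …' with the inner 'for w, cw in groups' loop
def bLoop (zeros : Bool) : List (Int × Int) → PySem.Dict Int Int → PySem.Dict Int Int
  | [], conv => conv
  | (v, c) :: groups, conv =>
    let conv1 := if zeros && decide (1 < c) then
        conv.insert 0 (conv.getD 0 0 + PySem.Int.floordiv (c * (c - 1)) 2)
      else conv
    let conv2 := groups.foldl
      (fun conv p => conv.insert (v - p.1) (conv.getD (v - p.1) 0 + c * p.2)) conv1
    bLoop zeros groups conv2

def find_spectral_convolution_alt (spectrum : List Int) (zeros : Bool) : List (Int × Int) :=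
  -- counts[m] = counts.get(m, 0) + 1 over sorted(spectrum, reverse=True)
  let counts := (PySem.List.sorted spectrum (fun x => x) true).foldl
    (fun d m => d.insert m (d.getD m 0 + 1)) PySem.Dict.empty
  (bLoop zeros counts.items PySem.Dict.empty).items

-- ===== PRECONDITION & SPEC =====
def Spec_find_spectral_convolution (spectrum : List Int) (zeros : Bool) (out : List (Int × Int)) : Prop := out = find_spectral_convolution_alt spectrum zeros
instance (spectrum : List Int) (zeros : Bool) (out : List (Int × Int)) : Decidable (Spec_find_spectral_convolution spectrum zeros out) := by unfold Spec_find_spectral_convolution; infer_instance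

-- ===== CLAIM (what is proved, stated in full; the proofs are below) =====
def Claim_equal_find_spectral_convolution : Prop := ∀ (spectrum : List Int) (zeros : Bool), Dom_find_spectral_convolution spectrum zeros → Spec_find_spectral_convolution spectrum zeros (find_spectral_convolution spectrum zeros)

-- ===== LEMMAS AND PROOFS =====

-- fold inserting +1 per key (A's dict update), and the weighted fold (B's dict update)
def dfold (L : List Int) (d : PySem.Dict Int Int) : PySem.Dict Int Int :=
  L.foldl (fun d k => d.insert k (d.getD k 0 + 1)) d

def wfold (P : List (Int × Int)) (d : PySem.Dict Int Int) : PySem.Dict Int Int :=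
  P.foldl (fun d p => d.insert p.1 (d.getD p.1 0 + p.2)) d

-- the diffs A inserts for one outer index, then for the whole scan, in insertion order
def diffsRow (zeros : Bool) (x : Int) (t : List Int) : List Int :=
  t.filterMap (fun y => if (x != y) || zeros then some (x - y) else none)

def diffs (zeros : Bool) : List Int → List Int
  | [] => []
  | x :: t => diffsRow zeros x t ++ diffs zeros t

-- the (key, weight) pairs B inserts, in insertion order
def wrow (zeros : Bool) (v c : Int) (g : List (Int × Int)) : List (Int × Int) :=
  (if zeros && decide (1 < c) then [((0 : Int), PySem.Int.floordiv (c * (c - 1)) 2)] else []) ++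
    g.map (fun p => (v - p.1, c * p.2))

def wpairs (zeros : Bool) : List (Int × Int) → List (Int × Int)
  | [] => []
  | (v, c) :: g => wrow zeros v c g ++ wpairs zeros g

def groupsOf (s : List Int) : List (Int × Int) :=
  (PySem.Set.ofList s).map (fun k => (k, (s.count k : Int)))

-- the diffs contributed by one block of c copies of x in front of r
def Zc (zeros : Bool) (x : Int) (r : List Int) : Nat → List Int
  | 0 => []
  | c + 1 => (if zeros then List.replicate c 0 else []) ++ r.map (x - ·) ++ Zc zeros x r c

theorem aInner_eq (s : List Int) (zeros : Bool) (xi : Int) (j : Nat) (conv : PySem.Dict Int Int) :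
    aInner s zeros xi j conv = dfold (diffsRow zeros xi (s.drop j)) conv := by
  fun_induction aInner s zeros xi j conv with
  | case1 j conv h xj ih =>
    simp only [dite_eq_ite] at ih
    by_cases hc : (xi != s[j] || zeros) = true
    · rw [if_pos hc] at ih
      rw [if_pos hc, ih, List.drop_eq_getElem_cons h]
      simp only [diffsRow, List.filterMap_cons, hc, if_true]
      rfl
    · rw [if_neg hc] at ih
      rw [if_neg hc, ih, List.drop_eq_getElem_cons h]
      simp only [diffsRow, List.filterMap_cons, if_neg hc]
  | case2 j conv h =>
    rw [List.drop_eq_nil_iff.mpr (by omega)]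
    rfl

theorem aOuter_eq (s : List Int) (zeros : Bool) (i : Nat) (conv : PySem.Dict Int Int) :
    aOuter s zeros i conv = dfold (diffs zeros (s.drop i)) conv := by
  fun_induction aOuter s zeros i conv with
  | case1 i conv h ih =>
    rw [ih, aInner_eq, List.drop_eq_getElem_cons h]
    simp only [diffs, dfold, List.foldl_append]
  | case2 i conv h =>
    rw [List.drop_eq_nil_iff.mpr (by omega)]
    rfl

theorem bLoop_eq (zeros : Bool) (g : List (Int × Int)) (conv : PySem.Dict Int Int) :
    bLoop zeros g conv = wfold (wpairs zeros g) conv := by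
  induction g generalizing conv with
  | nil => rfl
  | cons p g ih =>
    obtain ⟨v, c⟩ := p
    rw [bLoop, ih]
    simp only [wpairs, wrow, wfold, List.foldl_append, List.foldl_map]
    split
    · rfl
    · rfl

theorem getD_wfold (P : List (Int × Int)) (d : PySem.Dict Int Int) (k : Int) :
    (wfold P d).getD k 0 = d.getD k 0 + ((P.filter (fun p => p.1 == k)).map (·.2)).sum := by
  induction P generalizing d with
  | nil => simp [wfold]
  | cons p P ih =>
    rw [wfold, List.foldl_cons, ← wfold, ih, List.filter_cons]
    by_cases hk : p.1 = k
    · simp [hk, PySem.Dict.getD_insert]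
      ring
    · simp only [PySem.Dict.getD_insert]
      rw [if_neg (fun hkp => hk hkp.symm)]
      simp [hk]

theorem keys_wfold (P : List (Int × Int)) (d : PySem.Dict Int Int) :
    (wfold P d).keys = PySem.Set.update d.keys (P.map (·.1)) := by
  exact PySem.Dict.keys_foldl_insert_key P (·.1) (fun d p => d.getD p.1 0 + p.2) d

theorem sorted_twice (xs : List Int) :
    PySem.List.sorted (PySem.List.sorted xs (fun x => x) false) (fun x => x) true =
      PySem.List.sorted xs (fun x => x) true := by
  apply PySem.List.eq_of_perm_of_pairwise_le_of_injective (key := fun y : Int => -y)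
    (fun a b hab => neg_inj.mp hab)
  · exact ((PySem.List.sorted_perm _ _ _).trans (PySem.List.sorted_perm _ _ _)).trans
      (PySem.List.sorted_perm _ _ _).symm
  · exact (PySem.List.sorted_pairwise_rev _ _).imp (by intro a b hab; omega)
  · exact (PySem.List.sorted_pairwise_rev _ _).imp (by intro a b hab; omega)

theorem update_absorb (S : PySem.Set Int) (l : List Int) (h : ∀ y ∈ l, y ∈ S) :
    PySem.Set.update S l = S := by
  rw [PySem.Set.update_eq_append_filter]
  have hnil : (PySem.Set.ofList l).filter (fun y => !(PySem.Set.contains S y)) = [] := by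
    apply List.filter_eq_nil_iff.mpr
    intro y hy
    have hyS := h y (by rwa [PySem.Set.mem_ofList] at hy)
    simp [PySem.Set.contains_eq_listContains, hyS]
  rw [hnil, List.append_nil]

theorem update_congr (S : PySem.Set Int) (l₁ l₂ : List Int)
    (h : PySem.Set.ofList l₁ = PySem.Set.ofList l₂) :
    PySem.Set.update S l₁ = PySem.Set.update S l₂ := by
  rw [PySem.Set.update_eq_append_filter, PySem.Set.update_eq_append_filter, h]

theorem ofList_map_inj (f : Int → Int) (hf : Function.Injective f) (l : List Int) :
    PySem.Set.ofList (l.map f) = (PySem.Set.ofList l).map f := by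
  induction l using List.reverseRecOn with
  | nil => rfl
  | append_singleton l a ih =>
    rw [List.map_append, List.map_singleton, PySem.Set.ofList_append_singleton,
      PySem.Set.ofList_append_singleton, ih]
    by_cases hm : a ∈ PySem.Set.ofList l
    · rw [PySem.Set.add_of_mem hm, PySem.Set.add_of_mem (List.mem_map_of_mem hm)]
    · rw [PySem.Set.add_of_not_mem hm,
        PySem.Set.add_of_not_mem (fun hc => hm (by
          obtain ⟨b, hb, hfb⟩ := List.mem_map.mp hc
          rwa [← hf hfb])), List.map_append, List.map_singleton]

theorem ofList_replicate_pos (c : Nat) (hc : 0 < c) (x : Int) :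
    PySem.Set.ofList (List.replicate c x) = [x] := by
  induction c with
  | zero => omega
  | succ c ih =>
    rw [List.replicate_succ, PySem.Set.ofList_cons]
    rcases Nat.eq_zero_or_pos c with h0 | h0
    · subst h0; rfl
    · rw [ih h0]
      simp [PySem.Set.discard]

theorem dropWhile_head_not (p : Int → Bool) : ∀ (l : List Int) (a : Int) (r' : List Int),
    l.dropWhile p = a :: r' → p a = false := by
  intro l
  induction l with
  | nil => intro a r' h; simp at h
  | cons b l ih =>
    intro a r' h
    by_cases hb : p b
    · rw [List.dropWhile_cons_of_pos hb] at h; exact ih a r' h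
    · rw [List.dropWhile_cons_of_neg hb] at h
      cases h
      simpa using hb

theorem desc_block (x : Int) (t : List Int)
    (h : (x :: t).Pairwise (fun a b => b ≤ a)) :
    ∃ c r, x :: t = List.replicate c x ++ r ∧ 0 < c ∧ (∀ y ∈ r, y < x) ∧
      r.Pairwise (fun a b => b ≤ a) ∧ (x :: t).count x = c := by
  refine ⟨((x :: t).takeWhile (· == x)).length, (x :: t).dropWhile (· == x), ?_, ?_, ?_, ?_, ?_⟩
  case _ =>
    conv_lhs => rw [← List.takeWhile_append_dropWhile (p := (· == x)) (l := x :: t)]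
    congr 1
    apply List.eq_replicate_iff.mpr
    refine ⟨rfl, ?_⟩
    intro b hb
    exact eq_of_beq (List.mem_takeWhile_imp (p := (· == x)) hb)
  case _ =>
    rw [List.takeWhile_cons, if_pos (by simp)]
    simp
  case _ =>
    intro y hy
    have hle : ∀ z ∈ (x :: t).dropWhile (· == x), z ≤ x := by
      intro z hz
      have hzs : z ∈ x :: t := (List.dropWhile_sublist _).mem hz
      rcases List.mem_cons.mp hzs with h1 | h1
      · omega
      · exact List.rel_of_pairwise_cons h h1
    cases hd : (x :: t).dropWhile (· == x) with
    | nil => rw [hd] at hy; simp at hy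
    | cons a r' =>
      have ha : (a == x) = false := dropWhile_head_not (· == x) _ _ _ hd
      have hax : a ≠ x := by simpa using ha
      have halt : a < x := lt_of_le_of_ne (hle a (by rw [hd]; exact List.mem_cons_self ..)) hax
      rw [hd] at hy
      rcases List.mem_cons.mp hy with h1 | h1
      · omega
      · have hpr : (a :: r').Pairwise (fun a b => b ≤ a) := hd ▸ h.sublist (List.dropWhile_sublist _)
        have := List.rel_of_pairwise_cons hpr h1
        omega
  case _ => exact h.sublist (List.dropWhile_sublist _)
  case _ =>
    conv_lhs => rw [← List.takeWhile_append_dropWhile (p := (· == x)) (l := x :: t)]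
    rw [List.count_append]
    have h1 : ((x :: t).takeWhile (· == x)).count x = ((x :: t).takeWhile (· == x)).length := by
      apply List.count_eq_length.mpr
      intro b hb
      have := eq_of_beq (List.mem_takeWhile_imp (p := (· == x)) hb)
      simp [this]
    have h2 : ((x :: t).dropWhile (· == x)).count x = 0 := by
      apply List.count_eq_zero.mpr
      intro hx
      -- x ∈ dropWhile: but every element of dropWhile is < x (proved above, redo cheaply)
      cases hd : (x :: t).dropWhile (· == x) with
      | nil => rw [hd] at hx; simp at hx
      | cons a r' =>
        have ha : (a == x) = false := dropWhile_head_not (· == x) _ _ _ hd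
        have hax : a ≠ x := by simpa using ha
        have hle : ∀ z ∈ (x :: t).dropWhile (· == x), z ≤ x := by
          intro z hz
          have hzs : z ∈ x :: t := (List.dropWhile_sublist _).mem hz
          rcases List.mem_cons.mp hzs with h1 | h1
          · omega
          · exact List.rel_of_pairwise_cons h h1
        rw [hd] at hx
        rcases List.mem_cons.mp hx with h1 | h1
        · exact hax h1.symm
        · have hpr : (a :: r').Pairwise (fun a b => b ≤ a) := hd ▸ h.sublist (List.dropWhile_sublist _)
          have h3 := List.rel_of_pairwise_cons hpr h1
          have h4 : a ≤ x := hle a (by rw [hd]; exact List.mem_cons_self ..)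
          have : a ≠ x := hax
          omega
    omega

theorem diffsRow_lt (zeros : Bool) (x : Int) (r : List Int) (hr : ∀ y ∈ r, y < x) :
    diffsRow zeros x r = r.map (x - ·) := by
  induction r with
  | nil => rfl
  | cons a r ih =>
    have hax : (x != a || zeros) = true := by
      have : a < x := hr a (List.mem_cons_self ..)
      have hne : x ≠ a := by omega
      simp [hne]
    simp only [diffsRow, List.filterMap_cons, hax, if_true, List.map_cons]
    rw [← diffsRow, ih (fun y hy => hr y (List.mem_cons_of_mem a hy))]

theorem diffsRow_replicate (zeros : Bool) (x : Int) (c : Nat) :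
    diffsRow zeros x (List.replicate c x) = if zeros then List.replicate c 0 else [] := by
  induction c with
  | zero => cases zeros <;> rfl
  | succ c ih =>
    rw [List.replicate_succ]
    simp only [diffsRow, List.filterMap_cons] at ih ⊢
    cases zeros <;> simp_all [sub_self, List.replicate_succ]

theorem diffs_block (zeros : Bool) (x : Int) (r : List Int) (hr : ∀ y ∈ r, y < x) (c : Nat) :
    diffs zeros (List.replicate c x ++ r) = Zc zeros x r c ++ diffs zeros r := by
  induction c with
  | zero => simp [Zc]
  | succ c ih =>
    rw [List.replicate_succ, List.cons_append, diffs, ih]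
    have hrow : diffsRow zeros x (List.replicate c x ++ r) =
        (if zeros then List.replicate c 0 else []) ++ r.map (x - ·) := by
      rw [diffsRow, List.filterMap_append, ← diffsRow, ← diffsRow, diffsRow_replicate,
        diffsRow_lt zeros x r hr]
    rw [hrow, Zc]
    simp [List.append_assoc]

theorem count_map_sub (x k : Int) (r : List Int) :
    (r.map (x - ·)).count k = r.count (x - k) := by
  induction r with
  | nil => rfl
  | cons a r ih =>
    simp only [List.map_cons, List.count_cons, ih]
    by_cases h : a = x - k
    · subst h; simp
    · have h2 : x - a ≠ k := by omega
      simp [h, h2]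

theorem count_Zc (zeros : Bool) (x : Int) (r : List Int) (hr : ∀ y ∈ r, y < x) (c : Nat) (k : Int) :
    (Zc zeros x r c).count k =
      (if zeros = true ∧ k = 0 then c * (c - 1) / 2 else 0) + c * r.count (x - k) := by
  induction c with
  | zero => simp [Zc]
  | succ c ih =>
    rw [Zc, List.count_append, List.count_append, ih, count_map_sub]
    by_cases hz : zeros = true
    · by_cases hk : k = 0
      · subst hk
        rw [hz]
        have hx0 : r.count (x - 0) = 0 :=
          List.count_eq_zero.mpr (fun hx => absurd (hr _ hx) (by omega))
        simp only [List.count_replicate, hx0, Nat.mul_zero, Nat.add_zero, if_true, true_and,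
          if_pos rfl, beq_self_eq_true]
        rcases Nat.eq_zero_or_pos c with h0 | h0
        · subst h0; simp
        · obtain ⟨m, rfl⟩ : ∃ m, c = m + 1 := ⟨c - 1, by omega⟩
          have hdvd : 2 ∣ (m + 1) * m := by
            rcases Nat.even_or_odd m with he | ho
            · exact he.two_dvd.mul_left _
            · exact (Odd.add_one ho).two_dvd.mul_right _
          have hdvd2 : 2 ∣ (m + 2) * (m + 1) := by
            rcases Nat.even_or_odd (m + 1) with he | ho
            · exact he.two_dvd.mul_left _
            · exact (Odd.add_one ho).two_dvd.mul_right _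
          obtain ⟨u, hu⟩ := hdvd
          obtain ⟨v, hv⟩ := hdvd2
          have hB : (m + 1 + 1) * (m + 1) = 2 * v := by rw [show m + 1 + 1 = m + 2 from rfl, hv]
          have hBA : 2 * v = 2 * u + 2 * (m + 1) := by
            rw [← hv, ← hu, show m + 2 = m + 1 + 1 from rfl]
            ring
          simp only [Nat.add_sub_cancel, hu, hB]
          omega
      · have hne : ¬(zeros = true ∧ k = 0) := fun hc => hk hc.2
        rw [if_neg hne, if_neg hne, hz]
        have h0k : ((0 : Int) == k) = false := by
          simp only [beq_eq_false_iff_ne, ne_eq]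
          exact fun h => hk h.symm
        simp only [if_true, List.count_replicate, h0k, Bool.false_eq_true, if_false]
        ring
    · have hzf : zeros = false := by simpa using hz
      have hne : ¬(zeros = true ∧ k = 0) := fun hc => hz hc.1
      rw [if_neg hne, if_neg hne, hzf]
      simp only [Bool.false_eq_true, if_false, List.count_nil]
      ring

theorem filter_eq_of_nodup (l : List Int) (hl : l.Nodup) (a : Int) :
    l.filter (fun y => y == a) = if a ∈ l then [a] else [] := by
  induction l with
  | nil => rw [List.filter_nil, if_neg (by simp)]
  | cons b l ih =>
    have hbl : b ∉ l := (List.nodup_cons.mp hl).1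
    rw [List.filter_cons]
    by_cases hba : b = a
    · subst hba
      rw [if_pos (by simp), ih (List.nodup_cons.mp hl).2, if_neg hbl,
        if_pos (List.mem_cons_self ..)]
    · rw [if_neg (by simpa using hba), ih (List.nodup_cons.mp hl).2]
      by_cases hal : a ∈ l
      · rw [if_pos hal, if_pos (List.mem_cons_of_mem b hal)]
      · rw [if_neg hal, if_neg (fun hc => by
          rcases List.mem_cons.mp hc with h | h
          · exact hba h.symm
          · exact hal h)]

theorem sub_inj (x : Int) : Function.Injective (fun y : Int => x - y) := by
  intro a b hab
  simp only at hab
  omega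

theorem filter_not_zero (L : List Int) (h : ∀ y ∈ L, y ≠ 0) :
    L.filter (fun y => !(PySem.Set.contains [(0 : Int)] y)) = L := by
  apply List.filter_eq_self.mpr
  intro y hy
  have := h y hy
  simp [PySem.Set.contains_eq_listContains, this]

theorem ofList_Zc (zeros : Bool) (x : Int) (r : List Int) (hr : ∀ y ∈ r, y < x) (c : Nat) :
    PySem.Set.ofList (Zc zeros x r (c + 1)) =
      (if zeros = true ∧ 0 < c then [(0 : Int)] else []) ++ (PySem.Set.ofList r).map (x - ·) := by
  have hS : PySem.Set.ofList (r.map (x - ·)) = (PySem.Set.ofList r).map (x - ·) :=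
    ofList_map_inj _ (sub_inj x) r
  have hSnodup : ((PySem.Set.ofList r).map (x - ·)).Nodup :=
    (PySem.Set.nodup_ofList r).map (sub_inj x)
  have h0S : ∀ y ∈ (PySem.Set.ofList r).map (x - ·), y ≠ 0 := by
    intro y hy
    obtain ⟨w, hw, rfl⟩ := List.mem_map.mp hy
    have : w ∈ r := by rwa [PySem.Set.mem_ofList] at hw
    have := hr w this
    omega
  induction c with
  | zero =>
    have h1 : Zc zeros x r 1 = r.map (x - ·) := by cases zeros <;> simp [Zc]
    rw [h1, hS]
    simp
  | succ c ih =>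
    rw [Zc]
    cases hz : zeros with
    | false =>
      simp only [Bool.false_eq_true, if_false, List.nil_append]
      rw [hz] at ih
      simp only [Bool.false_eq_true, false_and, if_false, List.nil_append] at ih
      rw [PySem.Set.ofList_append, hS]
      rw [update_congr _ _ ((PySem.Set.ofList r).map (x - ·))
        (by rw [ih]; exact (PySem.Set.ofList_eq_self_of_nodup _ hSnodup).symm)]
      exact update_absorb _ _ (fun y hy => hy)
    | true =>
      simp only [if_true]
      rw [hz] at ih
      simp only [true_and] at ih
      rw [List.append_assoc, PySem.Set.ofList_append,
        ofList_replicate_pos (c + 1) (by omega), PySem.Set.update_eq_append_filter,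
        PySem.Set.ofList_append, hS]
      by_cases h0c : 0 < c
      · have hn : ([(0 : Int)] ++ (PySem.Set.ofList r).map (x - ·)).Nodup := by
          rw [List.singleton_append, List.nodup_cons]
          exact ⟨fun hc => (h0S 0 hc) rfl, hSnodup⟩
        rw [update_congr _ _ ([(0 : Int)] ++ (PySem.Set.ofList r).map (x - ·))
          (by rw [ih, if_pos h0c]
              exact (PySem.Set.ofList_eq_self_of_nodup _ hn).symm)]
        rw [PySem.Set.update_append, PySem.Set.update_cons, PySem.Set.update_nil,
          PySem.Set.add_of_not_mem (fun hc => (h0S 0 hc) rfl)]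
        rw [update_absorb _ _ (fun y hy => List.mem_append_left _ hy)]
        rw [List.filter_append, filter_not_zero _ h0S]
        have : ([(0 : Int)].filter (fun y => !(PySem.Set.contains [(0 : Int)] y))) = [] := by
          simp [PySem.Set.contains_eq_listContains]
        rw [this, List.append_nil]
        rw [if_pos ⟨trivial, by omega⟩]
      · rw [update_congr _ _ ((PySem.Set.ofList r).map (x - ·))
          (by rw [ih, if_neg h0c, List.nil_append]
              exact (PySem.Set.ofList_eq_self_of_nodup _ hSnodup).symm)]
        rw [update_absorb _ _ (fun y hy => hy), filter_not_zero _ h0S, if_pos ⟨trivial, by omega⟩]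

theorem groupsOf_block (x : Int) (r : List Int) (hr : ∀ y ∈ r, y < x) (c : Nat) (hc : 0 < c) :
    groupsOf (List.replicate c x ++ r) = (x, (c : Int)) :: groupsOf r := by
  have hxr : x ∉ r := fun hx => absurd (hr x hx) (lt_irrefl x)
  have hof : PySem.Set.ofList (List.replicate c x ++ r) = x :: PySem.Set.ofList r := by
    rw [PySem.Set.ofList_append, ofList_replicate_pos c hc x, PySem.Set.update_eq_append_filter]
    have hfil : (PySem.Set.ofList r).filter (fun y => !(PySem.Set.contains [x] y)) =
        PySem.Set.ofList r := by
      apply List.filter_eq_self.mpr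
      intro y hy
      have hyr : y ∈ r := by rwa [PySem.Set.mem_ofList] at hy
      have : y ≠ x := by have := hr y hyr; omega
      simp [PySem.Set.contains_eq_listContains, this]
    rw [hfil]
    rfl
  rw [groupsOf, hof, List.map_cons]
  have hcx : (List.replicate c x ++ r).count x = c := by
    rw [List.count_append, List.count_replicate_self, List.count_eq_zero.mpr hxr]
    omega
  rw [hcx]
  congr 1
  rw [groupsOf]
  apply List.map_congr_left
  intro k hk
  have hkr : k ∈ r := by rwa [PySem.Set.mem_ofList] at hk
  have hkx : k ≠ x := by have := hr k hkr; omega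
  have : (List.replicate c x ++ r).count k = r.count k := by
    rw [List.count_append, List.count_eq_zero.mpr (fun hm => hkx (List.eq_of_mem_replicate hm)),
      Nat.zero_add]
  rw [this]

theorem beq_sub_flip (x k w : Int) : (x - w == k) = (w == x - k) := by
  by_cases h : x - w = k
  · have h2 : w = x - k := by omega
    simp [h, h2]
  · have h2 : w ≠ x - k := by omega
    simp [h, h2]

theorem wrow_keys (zeros : Bool) (x : Int) (r : List Int) (c : Nat) :
    (wrow zeros x (c : Int) (groupsOf r)).map (·.1) =
      (if zeros = true ∧ 1 < c then [(0 : Int)] else []) ++ (PySem.Set.ofList r).map (x - ·) := by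
  rw [wrow, List.map_append, List.map_map, groupsOf, List.map_map]
  congr 1
  · by_cases hz : zeros = true ∧ 1 < c
    · rw [if_pos (show (zeros && decide (1 < (c : Int))) = true by
        simp [hz.1]; exact_mod_cast hz.2), if_pos hz]
      rfl
    · rw [if_neg (fun hc => hz ⟨by
        rcases Bool.and_eq_true _ _ |>.mp hc with ⟨h1, _⟩
        exact h1, by
        rcases Bool.and_eq_true _ _ |>.mp hc with ⟨_, h2⟩
        exact_mod_cast of_decide_eq_true h2⟩), if_neg hz]
      rfl

theorem row_counts (zeros : Bool) (x : Int) (r : List Int) (hr : ∀ y ∈ r, y < x)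
    (c : Nat) (hc : 0 < c) (k : Int) :
    (((Zc zeros x r c).count k : Int)) =
      (((wrow zeros x (c : Int) (groupsOf r)).filter (fun p => p.1 == k)).map (·.2)).sum := by
  rw [count_Zc zeros x r hr c k, wrow, List.filter_append, List.map_append, List.sum_append]
  have hmap : ((((groupsOf r).map (fun p => (x - p.1, (c : Int) * p.2))).filter
      (fun p => p.1 == k)).map (·.2)).sum = (c : Int) * r.count (x - k) := by
    rw [groupsOf, List.map_map]
    have hcomp : (PySem.Set.ofList r).map
        ((fun p => (x - p.1, (c : Int) * p.2)) ∘ (fun w => (w, (r.count w : Int)))) =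
        (PySem.Set.ofList r).map (fun w => (x - w, (c : Int) * (r.count w : Int))) := rfl
    rw [hcomp, List.filter_map]
    have hpred : ∀ w ∈ PySem.Set.ofList r,
        ((fun p => p.1 == k) ∘ (fun w => (x - w, (c : Int) * (r.count w : Int)))) w
          = (w == x - k) := by
      intro w _
      exact beq_sub_flip x k w
    rw [List.filter_congr hpred, filter_eq_of_nodup _ (PySem.Set.nodup_ofList r) (x - k)]
    by_cases hm : x - k ∈ PySem.Set.ofList r
    · rw [if_pos hm]
      simp
    · rw [if_neg hm]
      have : r.count (x - k) = 0 := List.count_eq_zero.mpr (fun hc2 => hm (by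
        rw [PySem.Set.mem_ofList]; exact hc2))
      simp [this]
  rw [hmap]
  have hzpart : ((((if zeros && decide (1 < (c : Int)) then
      [((0 : Int), PySem.Int.floordiv ((c : Int) * ((c : Int) - 1)) 2)] else []).filter
      (fun p => p.1 == k)).map (·.2)).sum) =
      ((if zeros = true ∧ k = 0 then (c * (c - 1) / 2 : Nat) else 0 : Nat) : Int) := by
    by_cases hz : zeros = true ∧ 1 < c
    · rw [if_pos (by simp [hz.1]; exact_mod_cast hz.2)]
      by_cases hk : k = 0
      · subst hk
        rw [if_pos ⟨hz.1, rfl⟩]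
        have hfd : PySem.Int.floordiv ((c : Int) * ((c : Int) - 1)) 2 =
            ((c * (c - 1) / 2 : Nat) : Int) := by
          have h1 : (c : Int) * ((c : Int) - 1) = ((c * (c - 1) : Nat) : Int) := by
            have h2 : ((c : Int)) - 1 = ((c - 1 : Nat) : Int) := by
              have := hz.2; push_cast; omega
            rw [h2]
            push_cast
            ring
          rw [h1]
          exact_mod_cast PySem.Int.floordiv_natCast (c * (c - 1)) 2
        rw [← hfd]
        simp
      · rw [if_neg (fun hc2 => hk hc2.2)]
        have : ((0 : Int) == k) = false := by
          simp only [beq_eq_false_iff_ne, ne_eq]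
          exact fun h => hk h.symm
        simp [this]
    · rw [if_neg (by
        intro hc2
        rcases Bool.and_eq_true _ _ |>.mp hc2 with ⟨h1, h2⟩
        exact hz ⟨h1, by exact_mod_cast of_decide_eq_true h2⟩)]
      by_cases hk : zeros = true ∧ k = 0
      · rcases Nat.lt_or_ge 1 c with h1 | h1
        · exact absurd ⟨hk.1, h1⟩ hz
        · have : c = 1 := by omega
          subst this
          simp
      · rw [if_neg hk]
        simp
  rw [Nat.cast_add, ← hzpart, Nat.cast_mul]

theorem main_keys_counts (zeros : Bool) : ∀ n (s : List Int), s.length ≤ n →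
    s.Pairwise (fun a b => b ≤ a) →
    PySem.Set.ofList (diffs zeros s) =
      PySem.Set.ofList ((wpairs zeros (groupsOf s)).map (·.1)) ∧
    ∀ k : Int, ((diffs zeros s).count k : Int) =
      (((wpairs zeros (groupsOf s)).filter (fun p => p.1 == k)).map (·.2)).sum := by
  intro n
  induction n with
  | zero =>
    intro s hl _
    have : s = [] := List.eq_nil_of_length_eq_zero (by omega)
    subst this
    exact ⟨rfl, fun k => by simp [diffs, groupsOf, wpairs]⟩
  | succ n ihn =>
    intro s hl hp
    cases hs : s with
    | nil => exact ⟨rfl, fun k => by simp [diffs, groupsOf, wpairs]⟩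
    | cons x t =>
      subst hs
      obtain ⟨c, r, hsplit, hc, hrlt, hrp, hcount⟩ := desc_block x t hp
      have hlen : r.length ≤ n := by
        have hle := congrArg List.length hsplit
        simp only [List.length_cons, List.length_append, List.length_replicate] at hle
        simp only [List.length_cons] at hl
        omega
      obtain ⟨ihK, ihC⟩ := ihn r hlen hrp
      rw [hsplit, diffs_block zeros x r hrlt c, groupsOf_block x r hrlt c hc, wpairs]
      obtain ⟨m, rfl⟩ : ∃ m, c = m + 1 := ⟨c - 1, by omega⟩
      have hrowk : PySem.Set.ofList (Zc zeros x r (m + 1)) =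
          PySem.Set.ofList ((wrow zeros x ((m + 1 : Nat) : Int) (groupsOf r)).map (·.1)) := by
        rw [ofList_Zc zeros x r hrlt m, wrow_keys]
        have hiff : (zeros = true ∧ 0 < m) ↔ (zeros = true ∧ 1 < m + 1) :=
          ⟨fun h => ⟨h.1, by omega⟩, fun h => ⟨h.1, by omega⟩⟩
        have hSnodup : ((PySem.Set.ofList r).map (x - ·)).Nodup :=
          (PySem.Set.nodup_ofList r).map (sub_inj x)
        have h0S : (0 : Int) ∉ (PySem.Set.ofList r).map (x - ·) := by
          intro hc2
          obtain ⟨w, hw, hwe⟩ := List.mem_map.mp hc2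
          have hwr : w ∈ r := by rwa [PySem.Set.mem_ofList] at hw
          have := hrlt w hwr
          omega
        have hnod : ((if zeros = true ∧ 1 < m + 1 then [(0 : Int)] else []) ++
            (PySem.Set.ofList r).map (x - ·)).Nodup := by
          by_cases hz : zeros = true ∧ 1 < m + 1
          · rw [if_pos hz, List.singleton_append, List.nodup_cons]
            exact ⟨h0S, hSnodup⟩
          · rw [if_neg hz, List.nil_append]
            exact hSnodup
        rw [PySem.Set.ofList_eq_self_of_nodup _ hnod, if_congr hiff rfl rfl]
      constructor
      · rw [PySem.Set.ofList_append, List.map_append, PySem.Set.ofList_append,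
          PySem.Set.update_eq_append_filter, PySem.Set.update_eq_append_filter, hrowk, ihK]
      · intro k
        rw [List.count_append, List.filter_append, List.map_append, List.sum_append,
          ← row_counts zeros x r hrlt (m + 1) (by omega) k]
        push_cast
        rw [ihC k]

theorem fsc_eq (spectrum : List Int) (zeros : Bool) :
    find_spectral_convolution spectrum zeros =
      (dfold (diffs zeros (PySem.List.sorted spectrum (fun x => x) true))
        PySem.Dict.empty).items := by
  simp only [find_spectral_convolution, sorted_twice, aOuter_eq, List.drop_zero]

theorem fsc_alt_eq (spectrum : List Int) (zeros : Bool) :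
    find_spectral_convolution_alt spectrum zeros =
      (wfold (wpairs zeros (groupsOf (PySem.List.sorted spectrum (fun x => x) true)))
        PySem.Dict.empty).items := by
  simp only [find_spectral_convolution_alt, PySem.Dict.foldl_insert_getD_add_one_eq_counter,
    bLoop_eq, PySem.Dict.items_counter]
  rfl

-- ===== VERDICT (by name: the statement is the Claim_ definition above) =====
theorem find_spectral_convolution_spec : Claim_equal_find_spectral_convolution := by
  unfold Claim_equal_find_spectral_convolution
  intro spectrum zeros _
  unfold Spec_find_spectral_convolution
  rw [fsc_eq, fsc_alt_eq]
  set s := PySem.List.sorted spectrum (fun x => x) true with hsdef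
  have hp : s.Pairwise (fun a b => b ≤ a) := by
    simpa using PySem.List.sorted_pairwise_rev spectrum (fun x => x)
  obtain ⟨hK, hC⟩ := main_keys_counts zeros s.length s le_rfl hp
  have hKA : (dfold (diffs zeros s) PySem.Dict.empty).keys =
      PySem.Set.ofList (diffs zeros s) := by
    rw [dfold, PySem.Dict.keys_foldl_insert, PySem.Dict.keys_empty, PySem.Set.update_nil_left]
  have hKB : (wfold (wpairs zeros (groupsOf s)) PySem.Dict.empty).keys =
      PySem.Set.ofList ((wpairs zeros (groupsOf s)).map (·.1)) := by
    rw [keys_wfold, PySem.Dict.keys_empty, PySem.Set.update_nil_left]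
  have hnA : (dfold (diffs zeros s) PySem.Dict.empty).keys.Nodup := by
    rw [hKA]; exact PySem.Set.nodup_ofList _
  have hnB : (wfold (wpairs zeros (groupsOf s)) PySem.Dict.empty).keys.Nodup := by
    rw [hKB]; exact PySem.Set.nodup_ofList _
  rw [PySem.Dict.items_eq_map_keys _ hnA 0, PySem.Dict.items_eq_map_keys _ hnB 0, hKA, hKB, hK]
  apply List.map_congr_left
  intro k _
  congr 1
  rw [dfold, PySem.Dict.getD_foldl_insert_add_one, getD_wfold, PySem.Dict.getD_empty, hC k]
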